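-- pv_equiv track=rewrite | github.com/kantrolv/research_ai_assistant | agents/research_agent.py | _parse_followup_and_expand
-- ===== SOURCE A (Python) =====
-- def _parse_followup_and_expand(text: str) -> tuple[list[str], list[str]]:
--     """
--     Parse the merged LLM response that contains both follow-up questions
--     and expanded topics, separated by headers.
--
--     Returns:
--         (follow_up_questions, expanded_queries)
--     """
--     follow_ups = []
--     expanded = []
--     current_section = None
--
--     for line in text.strip().split("\n"):
--         line = line.strip()
--         if not line:
--             continue
--
--         upper = line.upper()
--         if "FOLLOW" in upper and ("QUESTION" in upper or "UP" in upper):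
--             current_section = "followup"
--             continue
--         elif "EXPAND" in upper and ("TOPIC" in upper or "QUER" in upper):
--             current_section = "expanded"
--             continue
--
--         # Clean the line (remove numbering)
--         cleaned = line.lstrip("0123456789.-) ").strip()
--         if not cleaned:
--             continue
--
--         if current_section == "followup":
--             follow_ups.append(cleaned)
--         elif current_section == "expanded":
--             expanded.append(cleaned)
--         elif not current_section and len(follow_ups) < 3:
--             # If no header found yet, assume follow-ups first
--             follow_ups.append(cleaned)
--
--     # If parsing failed to separate, split evenly
--     if not expanded and len(follow_ups) >= 6:
--         expanded = follow_ups[3:6]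
--         follow_ups = follow_ups[:3]
--
--     return follow_ups, expanded
-- ===== SOURCE B (Python) =====
-- def _parse_followup_and_expand(text: str) -> tuple[list[str], list[str]]:
--     def section_of(line):
--         u = line.upper()
--         if "FOLLOW" in u and ("QUESTION" in u or "UP" in u):
--             return "followup"
--         if "EXPAND" in u and ("TOPIC" in u or "QUER" in u):
--             return "expanded"
--         return None
--
--     def clean(line):
--         return line.lstrip("0123456789.-) ").strip()
--
--     # Phase 1: tag every non-header line with the section currently governing it.
--     tagged = []
--     section = None
--     for raw in text.strip().split("\n"):
--         line = raw.strip()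
--         found = section_of(line)
--         if found is not None:
--             section = found
--         else:
--             tagged.append((section, clean(line)))
--
--     # Phase 2: build both outputs by filtering the tagged lines.
--     follow_ups = [c for s, c in tagged if s is None and c][:3] \
--                + [c for s, c in tagged if s == "followup" and c]
--     expanded = [c for s, c in tagged if s == "expanded" and c]
--
--     if not expanded and len(follow_ups) >= 6:
--         follow_ups, expanded = follow_ups[:3], follow_ups[3:6]
--     return follow_ups, expanded
-- ===== Notes on version B (the rewrite author's own statement) =====
-- stated objective: alternative
-- what changed: Replaces A's single interleaved state machine (three accumulators, a section mode and a length-capped append decided per line) with a two-phase decomposition: a first pass tags every non-header line with its governing section, then the two outputs are built by pure filter/slice comprehensions over the tagged list.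
import Mathlib
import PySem

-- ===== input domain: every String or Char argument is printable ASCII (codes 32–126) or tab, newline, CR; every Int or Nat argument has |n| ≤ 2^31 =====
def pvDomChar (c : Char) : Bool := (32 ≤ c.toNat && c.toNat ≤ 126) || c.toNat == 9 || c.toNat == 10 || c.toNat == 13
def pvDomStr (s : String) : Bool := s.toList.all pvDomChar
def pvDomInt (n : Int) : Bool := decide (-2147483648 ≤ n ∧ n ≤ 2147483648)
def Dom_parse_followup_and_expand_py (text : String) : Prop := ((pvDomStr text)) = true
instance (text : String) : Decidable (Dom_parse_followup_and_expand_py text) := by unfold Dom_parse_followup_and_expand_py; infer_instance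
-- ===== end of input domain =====

-- B replaces A's interleaved per-line state machine by a tag-then-filter two-phase pass (alternative decomposition, same cost).

-- ===== PORT A =====
-- the char set of line.lstrip("0123456789.-) ")
def pvStripNumChars : List Char := "0123456789.-) ".toList

-- the body of A's for-loop, one line at a time over the state (follow_ups, expanded, current_section);
-- current_section: some true = "followup", some false = "expanded", none = None
def pvStepA (st : List String × List String × Option Bool) (line0 : List Char) :
    List String × List String × Option Bool :=
  let fu := st.1; let ex := st.2.1; let sec := st.2.2
  let line := PySem.Chars.strip line0
  if line = [] then (fu, ex, sec)
  else
    let upper := PySem.Chars.upper line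
    if PySem.Chars.isIn "FOLLOW".toList upper &&
       (PySem.Chars.isIn "QUESTION".toList upper || PySem.Chars.isIn "UP".toList upper) then
      (fu, ex, some true)
    else if PySem.Chars.isIn "EXPAND".toList upper &&
       (PySem.Chars.isIn "TOPIC".toList upper || PySem.Chars.isIn "QUER".toList upper) then
      (fu, ex, some false)
    else
      -- line.lstrip("0123456789.-) ") ported by hand as dropWhile of the char set (exact)
      let cleaned := PySem.Chars.strip (line.dropWhile (fun c => c ∈ pvStripNumChars))
      if cleaned = [] then (fu, ex, sec)
      else match sec with
        | some true  => (fu ++ [String.ofList cleaned], ex, sec)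
        | some false => (fu, ex ++ [String.ofList cleaned], sec)
        | none       => if fu.length < 3 then (fu ++ [String.ofList cleaned], ex, sec)
                        else (fu, ex, sec)

def parse_followup_and_expand_py (text : String) : List String × List String :=
  let st := (PySem.Chars.splitOn (PySem.Chars.strip text.toList) ['\n']).foldl pvStepA ([], [], none)
  let fu := st.1; let ex := st.2.1
  if ex = [] ∧ 6 ≤ fu.length then
    (PySem.List.slice fu none (some 3), PySem.List.slice fu (some 3) (some 6))
  else (fu, ex)

-- ===== PORT B =====
-- Source B's section_of: some true = "followup", some false = "expanded", none = no header
def pvSectionOf (line : List Char) : Option Bool :=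
  let u := PySem.Chars.upper line
  if PySem.Chars.isIn "FOLLOW".toList u &&
     (PySem.Chars.isIn "QUESTION".toList u || PySem.Chars.isIn "UP".toList u) then some true
  else if PySem.Chars.isIn "EXPAND".toList u &&
     (PySem.Chars.isIn "TOPIC".toList u || PySem.Chars.isIn "QUER".toList u) then some false
  else none

-- Source B's clean: line.lstrip("0123456789.-) ").strip(), lstrip(chars) ported by hand as dropWhile (exact)
def pvCleanB (line : List Char) : String :=
  String.ofList (PySem.Chars.strip (line.dropWhile (fun c => c ∈ pvStripNumChars)))

-- the body of Source B's phase-1 loop over the state (section, tagged)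
def pvStepB (st : Option Bool × List (Option Bool × String)) (raw : List Char) :
    Option Bool × List (Option Bool × String) :=
  let line := PySem.Chars.strip raw
  match pvSectionOf line with
  | some s => (some s, st.2)
  | none   => (st.1, st.2 ++ [(st.1, pvCleanB line)])

def parse_followup_and_expand_py_alt (text : String) : List String × List String :=
  -- Phase 1: tag every non-header line with the section currently governing it
  let phase1 := (PySem.Chars.splitOn (PySem.Chars.strip text.toList) ['\n']).foldl pvStepB (none, [])
  let tagged := phase1.2
  -- Phase 2: build both outputs by filtering the tagged lines
  let follow_ups :=
    ((tagged.filter (fun p => decide (p.1 = none ∧ p.2 ≠ ""))).map Prod.snd).take 3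
    ++ (tagged.filter (fun p => decide (p.1 = some true ∧ p.2 ≠ ""))).map Prod.snd
  let expanded := (tagged.filter (fun p => decide (p.1 = some false ∧ p.2 ≠ ""))).map Prod.snd
  if expanded = [] ∧ 6 ≤ follow_ups.length then
    (follow_ups.take 3, (follow_ups.drop 3).take 3)
  else (follow_ups, expanded)

-- ===== PRECONDITION & SPEC =====
def Spec_parse_followup_and_expand_py (text : String) (out : List String × List String) : Prop := out = parse_followup_and_expand_py_alt text
instance (text : String) (out : List String × List String) : Decidable (Spec_parse_followup_and_expand_py text out) := by unfold Spec_parse_followup_and_expand_py; infer_instance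

-- ===== CLAIM (what is proved, stated in full; the proofs are below) =====
def Claim_equal_parse_followup_and_expand_py : Prop := ∀ (text : String), Dom_parse_followup_and_expand_py text → Spec_parse_followup_and_expand_py text (parse_followup_and_expand_py text)

-- ===== LEMMAS AND PROOFS =====

-- the tagged list produced by B's phase 1, as a structural recursion
def pvT (ls : List (List Char)) (sec : Option Bool) : List (Option Bool × String) :=
  match ls with
  | [] => []
  | raw :: rest =>
    match pvSectionOf (PySem.Chars.strip raw) with
    | some s => pvT rest (some s)
    | none   => (sec, pvCleanB (PySem.Chars.strip raw)) :: pvT rest sec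

-- B's phase-1 fold computes pvT
theorem pvPhase1_eq (ls : List (List Char)) (sec : Option Bool) (acc : List (Option Bool × String)) :
    (ls.foldl pvStepB (sec, acc)).2 = acc ++ pvT ls sec := by
  induction ls generalizing sec acc with
  | nil => simp [pvT]
  | cons raw rest ih =>
    rw [List.foldl_cons, pvT]
    cases h : pvSectionOf (PySem.Chars.strip raw) with
    | some s => rw [show pvStepB (sec, acc) raw = (some s, acc) from by simp [pvStepB, h], ih]
    | none =>
      rw [show pvStepB (sec, acc) raw = (sec, acc ++ [(sec, pvCleanB (PySem.Chars.strip raw))]) from by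
            simp [pvStepB, h],
          ih]
      simp

def pvNoneF (t : List (Option Bool × String)) : List String :=
  (t.filter (fun p => decide (p.1 = none ∧ p.2 ≠ ""))).map Prod.snd
def pvFuF (t : List (Option Bool × String)) : List String :=
  (t.filter (fun p => decide (p.1 = some true ∧ p.2 ≠ ""))).map Prod.snd
def pvExF (t : List (Option Bool × String)) : List String :=
  (t.filter (fun p => decide (p.1 = some false ∧ p.2 ≠ ""))).map Prod.snd

-- once a section header has been seen, no line is ever tagged `none` again
theorem pvNoneF_some (ls : List (List Char)) (s : Bool) : pvNoneF (pvT ls (some s)) = [] := by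
  induction ls generalizing s with
  | nil => simp [pvT, pvNoneF]
  | cons raw rest ih =>
    rw [pvT]
    cases h : pvSectionOf (PySem.Chars.strip raw) with
    | some s' => exact ih s'
    | none => simp only [pvNoneF]; simpa [pvNoneF] using ih s

theorem pvNoneF_cons_some (b : Bool) (s : String) (t : List (Option Bool × String)) :
    pvNoneF ((some b, s) :: t) = pvNoneF t := by simp [pvNoneF]

theorem pvNoneF_cons_none (s : String) (h : s ≠ "") (t : List (Option Bool × String)) :
    pvNoneF ((none, s) :: t) = s :: pvNoneF t := by simp [pvNoneF, h]

theorem pvFuF_cons_true (s : String) (h : s ≠ "") (t : List (Option Bool × String)) :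
    pvFuF ((some true, s) :: t) = s :: pvFuF t := by simp [pvFuF, h]

theorem pvFuF_cons_of_ne (o : Option Bool) (ho : o ≠ some true) (s : String) (t : List (Option Bool × String)) :
    pvFuF ((o, s) :: t) = pvFuF t := by simp [pvFuF, ho]

theorem pvExF_cons_false (s : String) (h : s ≠ "") (t : List (Option Bool × String)) :
    pvExF ((some false, s) :: t) = s :: pvExF t := by simp [pvExF, h]

theorem pvExF_cons_of_ne (o : Option Bool) (ho : o ≠ some false) (s : String) (t : List (Option Bool × String)) :
    pvExF ((o, s) :: t) = pvExF t := by simp [pvExF, ho]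

-- the main loop invariant: A's state machine equals B's tag-then-filter reading
theorem pvLoop_eq (ls : List (List Char)) (fu ex : List String) (sec : Option Bool) :
    (ls.foldl pvStepA (fu, ex, sec)).1
      = fu ++ (pvNoneF (pvT ls sec)).take (3 - fu.length) ++ pvFuF (pvT ls sec)
    ∧ (ls.foldl pvStepA (fu, ex, sec)).2.1
      = ex ++ pvExF (pvT ls sec) := by
  induction ls generalizing fu ex sec with
  | nil => constructor <;> simp [pvT, pvNoneF, pvFuF, pvExF]
  | cons raw rest ih =>
    rw [List.foldl_cons, pvT]
    by_cases hline : PySem.Chars.strip raw = []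
    · have hsec : pvSectionOf (PySem.Chars.strip raw) = none := by rw [hline]; rfl
      have hclean : pvCleanB (PySem.Chars.strip raw) = "" := by rw [hline]; rfl
      rw [show pvStepA (fu, ex, sec) raw = (fu, ex, sec) from by simp [pvStepA, hline], hsec, hclean]
      simp only [pvNoneF, pvFuF, pvExF]
      simpa [pvNoneF, pvFuF, pvExF] using ih fu ex sec
    · by_cases hFU : (PySem.Chars.isIn "FOLLOW".toList (PySem.Chars.upper (PySem.Chars.strip raw)) &&
           (PySem.Chars.isIn "QUESTION".toList (PySem.Chars.upper (PySem.Chars.strip raw)) ||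
            PySem.Chars.isIn "UP".toList (PySem.Chars.upper (PySem.Chars.strip raw)))) = true
      · have hsec : pvSectionOf (PySem.Chars.strip raw) = some true := by
          simp only [pvSectionOf]; rw [if_pos hFU]
        rw [show pvStepA (fu, ex, sec) raw = (fu, ex, some true) from by
              simp only [pvStepA]; rw [if_neg hline, if_pos hFU],
            hsec]
        exact ih fu ex (some true)
      · by_cases hEX : (PySem.Chars.isIn "EXPAND".toList (PySem.Chars.upper (PySem.Chars.strip raw)) &&
             (PySem.Chars.isIn "TOPIC".toList (PySem.Chars.upper (PySem.Chars.strip raw)) ||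
              PySem.Chars.isIn "QUER".toList (PySem.Chars.upper (PySem.Chars.strip raw)))) = true
        · have hsec : pvSectionOf (PySem.Chars.strip raw) = some false := by
            simp only [pvSectionOf]; rw [if_neg hFU, if_pos hEX]
          rw [show pvStepA (fu, ex, sec) raw = (fu, ex, some false) from by
                simp only [pvStepA]; rw [if_neg hline, if_neg hFU, if_pos hEX],
              hsec]
          exact ih fu ex (some false)
        · have hsec : pvSectionOf (PySem.Chars.strip raw) = none := by
            simp only [pvSectionOf]
            rw [if_neg hFU, if_neg hEX]
          rw [hsec]
          by_cases hcl : PySem.Chars.strip ((PySem.Chars.strip raw).dropWhile (fun c => c ∈ pvStripNumChars)) = []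
          · have hclean : pvCleanB (PySem.Chars.strip raw) = "" := by
              simp [pvCleanB, hcl]
            rw [show pvStepA (fu, ex, sec) raw = (fu, ex, sec) from by
                  simp only [pvStepA]
                  rw [if_neg hline, if_neg hFU, if_neg hEX, if_pos hcl],
                hclean]
            simp only [pvNoneF, pvFuF, pvExF]
            simpa [pvNoneF, pvFuF, pvExF] using ih fu ex sec
          · have hclean : pvCleanB (PySem.Chars.strip raw) ≠ "" := by
              simp [pvCleanB, String.ofList_eq_empty_iff, hcl]
            have hCB : pvCleanB (PySem.Chars.strip raw)
                = String.ofList (PySem.Chars.strip ((PySem.Chars.strip raw).dropWhile (fun c => c ∈ pvStripNumChars))) := rfl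
            cases sec with
            | some s =>
              cases s with
              | true =>
                rw [show pvStepA (fu, ex, some true) raw
                      = (fu ++ [pvCleanB (PySem.Chars.strip raw)], ex, some true) from by
                    simp only [pvStepA]
                    rw [if_neg hline, if_neg hFU, if_neg hEX, if_neg hcl]
                    simp [pvCleanB]]
                have h1 := ih (fu ++ [pvCleanB (PySem.Chars.strip raw)]) ex (some true)
                rw [pvNoneF_cons_some, pvNoneF_some,
                    pvFuF_cons_true _ hclean,
                    pvExF_cons_of_ne (some true) (by simp)]
                refine ⟨?_, h1.2⟩
                rw [h1.1, pvNoneF_some]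
                simp
              | false =>
                rw [show pvStepA (fu, ex, some false) raw
                      = (fu, ex ++ [pvCleanB (PySem.Chars.strip raw)], some false) from by
                    simp only [pvStepA]
                    rw [if_neg hline, if_neg hFU, if_neg hEX, if_neg hcl]
                    simp [pvCleanB]]
                have h1 := ih fu (ex ++ [pvCleanB (PySem.Chars.strip raw)]) (some false)
                rw [pvNoneF_cons_some,
                    pvFuF_cons_of_ne (some false) (by simp),
                    pvExF_cons_false _ hclean]
                refine ⟨h1.1, ?_⟩
                rw [h1.2]
                simp
            | none =>
              rw [pvNoneF_cons_none _ hclean,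
                  pvFuF_cons_of_ne none (by simp),
                  pvExF_cons_of_ne none (by simp)]
              by_cases hlen : fu.length < 3
              · rw [show pvStepA (fu, ex, none) raw
                      = (fu ++ [pvCleanB (PySem.Chars.strip raw)], ex, none) from by
                    simp only [pvStepA]
                    rw [if_neg hline, if_neg hFU, if_neg hEX, if_neg hcl]
                    simp [hlen, pvCleanB]]
                have h1 := ih (fu ++ [pvCleanB (PySem.Chars.strip raw)]) ex none
                have htake : 3 - fu.length = (3 - (fu.length + 1)) + 1 := by omega
                refine ⟨?_, ?_⟩
                · rw [h1.1, htake, List.take_succ_cons]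
                  simp
                · exact h1.2
              · rw [show pvStepA (fu, ex, none) raw = (fu, ex, none) from by
                    simp only [pvStepA]
                    rw [if_neg hline, if_neg hFU, if_neg hEX, if_neg hcl]
                    simp [hlen]]
                have h1 := ih fu ex none
                have htake : 3 - fu.length = 0 := by omega
                refine ⟨?_, h1.2⟩
                rw [h1.1, htake]
                simp

-- ===== VERDICT (by name: the statement is the Claim_ definition above) =====
theorem parse_followup_and_expand_py_spec : Claim_equal_parse_followup_and_expand_py := by
  intro text _
  unfold Spec_parse_followup_and_expand_py parse_followup_and_expand_py parse_followup_and_expand_py_alt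
  have hT := pvPhase1_eq (PySem.Chars.splitOn (PySem.Chars.strip text.toList) ['\n']) none []
  have hL := pvLoop_eq (PySem.Chars.splitOn (PySem.Chars.strip text.toList) ['\n']) [] [] none
  simp only [List.nil_append, List.length_nil, Nat.sub_zero] at hT hL
  simp only [hT, hL.1, hL.2, pvNoneF, pvFuF, pvExF]
  split_ifs with h
  · rw [PySem.List.slice_to _ (b := 3) (by norm_num),
        PySem.List.slice_toNat _ (a := 3) (b := 6) (by norm_num) (by norm_num)]
    rw [show Int.toNat 3 = 3 from rfl, show Int.toNat 6 = 6 from rfl]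
  · rfl
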